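-- pv_equiv track=rewrite | github.com/kaizen-business-support/optimuscredit | modules/utils/ratios_validator.py | get_ratio_category
-- ===== SOURCE A (Python) =====
-- def get_ratio_category(ratio_key: str) -> str:
--     """Retourne la catégorie d'un ratio"""
--
--     categories = {
--         'liquidite': ['ratio_liquidite_generale', 'ratio_liquidite_reduite', 'ratio_liquidite_immediate'],
--         'structure_financiere': ['ratio_autonomie_financiere', 'ratio_endettement', 'ratio_couverture_charges'],
--         'rentabilite': ['roe', 'roa', 'marge_nette', 'marge_brute', 'marge_exploitation'],
--         'activite': ['rotation_actif', 'rotation_stocks', 'delai_recouvrement'],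
--         'gestion': ['productivite_personnel', 'charges_personnel_va', 'cafg_ca']
--     }
--
--     for category, ratios in categories.items():
--         if ratio_key in ratios:
--             return category
--
--     return 'autre'
-- ===== SOURCE B (Python) =====
-- # B: one flat inverted lookup table ratio->category, single dict.get with default; no per-category scanning loop.
-- _RATIO_TO_CATEGORY = {
--     'ratio_liquidite_generale': 'liquidite',
--     'ratio_liquidite_reduite': 'liquidite',
--     'ratio_liquidite_immediate': 'liquidite',
--     'ratio_autonomie_financiere': 'structure_financiere',
--     'ratio_endettement': 'structure_financiere',
--     'ratio_couverture_charges': 'structure_financiere',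
--     'roe': 'rentabilite',
--     'roa': 'rentabilite',
--     'marge_nette': 'rentabilite',
--     'marge_brute': 'rentabilite',
--     'marge_exploitation': 'rentabilite',
--     'rotation_actif': 'activite',
--     'rotation_stocks': 'activite',
--     'delai_recouvrement': 'activite',
--     'productivite_personnel': 'gestion',
--     'charges_personnel_va': 'gestion',
--     'cafg_ca': 'gestion',
-- }
--
-- def get_ratio_category(ratio_key: str) -> str:
--     """Retourne la catégorie d'un ratio"""
--     return _RATIO_TO_CATEGORY.get(ratio_key, 'autre')
-- ===== Notes on version B (the rewrite author's own statement) =====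
-- stated objective: idiomatic
-- what changed: Replaced the per-category loop with repeated list-membership scans by a flat inverted ratio->category dict built once at module level, so the body is a single dict.get with the same default fallback category.
import Mathlib
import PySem

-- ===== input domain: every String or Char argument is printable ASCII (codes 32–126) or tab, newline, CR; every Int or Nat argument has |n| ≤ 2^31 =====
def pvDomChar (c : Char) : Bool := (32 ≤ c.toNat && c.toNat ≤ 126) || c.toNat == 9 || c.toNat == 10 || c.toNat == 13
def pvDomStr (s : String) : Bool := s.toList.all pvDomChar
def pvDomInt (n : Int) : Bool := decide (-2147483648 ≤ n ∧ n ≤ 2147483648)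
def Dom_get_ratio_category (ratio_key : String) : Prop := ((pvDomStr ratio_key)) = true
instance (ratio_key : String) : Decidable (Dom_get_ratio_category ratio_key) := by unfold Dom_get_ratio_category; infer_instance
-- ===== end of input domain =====

-- B replaces A's loop over category→list groups (with a membership scan per category) by one
-- flat inverted ratio→category dict and a single lookup with default 'autre' (objective: idiomatic).

-- ===== PORT A =====
-- the dict literal 'categories', in insertion order
def pvCategoriesA : PySem.Dict String (List String) := PySem.Dict.ofList
  [ ("liquidite", ["ratio_liquidite_generale", "ratio_liquidite_reduite", "ratio_liquidite_immediate"])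
  , ("structure_financiere", ["ratio_autonomie_financiere", "ratio_endettement", "ratio_couverture_charges"])
  , ("rentabilite", ["roe", "roa", "marge_nette", "marge_brute", "marge_exploitation"])
  , ("activite", ["rotation_actif", "rotation_stocks", "delai_recouvrement"])
  , ("gestion", ["productivite_personnel", "charges_personnel_va", "cafg_ca"]) ]

-- the 'for category, ratios in categories.items(): if ratio_key in ratios: return category' loop
def pvLoopA (ratio_key : String) : List (String × List String) → String
  | [] => "autre"
  | (category, ratios) :: rest =>
      if ratios.contains ratio_key then category else pvLoopA ratio_key rest

def get_ratio_category (ratio_key : String) : String :=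
  pvLoopA ratio_key pvCategoriesA.items

-- ===== PORT B =====
def pvRatioToCategory : PySem.Dict String String := PySem.Dict.ofList
  [ ("ratio_liquidite_generale", "liquidite")
  , ("ratio_liquidite_reduite", "liquidite")
  , ("ratio_liquidite_immediate", "liquidite")
  , ("ratio_autonomie_financiere", "structure_financiere")
  , ("ratio_endettement", "structure_financiere")
  , ("ratio_couverture_charges", "structure_financiere")
  , ("roe", "rentabilite")
  , ("roa", "rentabilite")
  , ("marge_nette", "rentabilite")
  , ("marge_brute", "rentabilite")
  , ("marge_exploitation", "rentabilite")
  , ("rotation_actif", "activite")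
  , ("rotation_stocks", "activite")
  , ("delai_recouvrement", "activite")
  , ("productivite_personnel", "gestion")
  , ("charges_personnel_va", "gestion")
  , ("cafg_ca", "gestion") ]

def get_ratio_category_alt (ratio_key : String) : String :=
  pvRatioToCategory.getD ratio_key "autre"

-- ===== PRECONDITION & SPEC =====
def Spec_get_ratio_category (ratio_key : String) (out : String) : Prop := out = get_ratio_category_alt ratio_key
instance (ratio_key : String) (out : String) : Decidable (Spec_get_ratio_category ratio_key out) := by unfold Spec_get_ratio_category; infer_instance

-- ===== CLAIM (what is proved, stated in full; the proofs are below) =====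
def Claim_equal_get_ratio_category : Prop := ∀ (ratio_key : String), Dom_get_ratio_category ratio_key → Spec_get_ratio_category ratio_key (get_ratio_category ratio_key)

-- ===== LEMMAS AND PROOFS =====
-- one group of the flattened table: find? over rs.map (r, c) picks c exactly when rs contains k
theorem pv_inner (k c : String) (rs : List String) (l : List (String × String)) :
    Option.map (fun x => x.2) (List.find? (fun p => p.1 == k) (rs.map (fun r => (r, c)) ++ l)) =
      if rs.contains k then some c
      else Option.map (fun x => x.2) (List.find? (fun p => p.1 == k) l) := by
  induction rs with
  | nil => simp
  | cons r rs ih =>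
      simp only [List.map_cons, List.cons_append]
      by_cases h : r = k
      · rw [List.find?_cons_of_pos (h := by simp [h])]
        simp [h]
      · rw [List.find?_cons_of_neg (h := by simp [h])]
        rw [ih]
        simp [Ne.symm h]

-- A's loop over groups equals lookup in the flattened inverted table
theorem pv_loop_eq_find (k : String) (groups : List (String × List String)) :
    pvLoopA k groups =
      (Option.map (fun x => x.2)
        (List.find? (fun p => p.1 == k)
          (groups.flatMap (fun g => g.2.map (fun r => (r, g.1)))))).getD "autre" := by
  induction groups with
  | nil => simp [pvLoopA]
  | cons g rest ih =>
      obtain ⟨c, rs⟩ := g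
      simp only [pvLoopA, List.flatMap_cons]
      rw [pv_inner]
      by_cases h : rs.contains k = true
      · rw [if_pos h, if_pos h]
        simp
      · rw [if_neg h, if_neg h]
        exact ih

-- the flat literal of B IS the flattening of A's grouped literal
theorem pv_items_eq :
    pvRatioToCategory.items =
      pvCategoriesA.items.flatMap (fun g => g.2.map (fun r => (r, g.1))) := by decide

theorem pv_eq (k : String) : get_ratio_category k = get_ratio_category_alt k := by
  simp only [get_ratio_category, get_ratio_category_alt, PySem.Dict.getD, PySem.Dict.get?,
    pv_items_eq]
  exact pv_loop_eq_find k pvCategoriesA.items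

-- ===== VERDICT (by name: the statement is the Claim_ definition above) =====
theorem get_ratio_category_spec : Claim_equal_get_ratio_category := by
  intro k _
  exact pv_eq k
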